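-- pv_equiv track=rewrite | github.com/kudrin59/swgoh-api | swgoh/Guild.py | get_count_omicrons
-- ===== SOURCE A (Python) =====
-- def get_count_omicrons(units):
--     list = []
--     for unit in units:
--         add = False
--         for charter in list:
--             if charter[0] == unit:
--                 charter[1] += 1
--                 add = True
--                 break
--         if not add:
--             list.append([unit, 1])
--     return list
-- ===== SOURCE B (Python) =====
-- def get_count_omicrons(units):
--     unique = []
--     for u in units:
--         if u not in unique:
--             unique.append(u)
--     return [[u, units.count(u)] for u in unique]
-- ===== Notes on version B (the rewrite author's own statement) =====
-- stated objective: alternative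
-- what changed: Replaces A's single interleaved find-or-increment loop over a growing list of [unit, count] pairs by two staged passes: first discover the first-appearance order of distinct units, then tally each with units.count in a separate pass.
import Mathlib
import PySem

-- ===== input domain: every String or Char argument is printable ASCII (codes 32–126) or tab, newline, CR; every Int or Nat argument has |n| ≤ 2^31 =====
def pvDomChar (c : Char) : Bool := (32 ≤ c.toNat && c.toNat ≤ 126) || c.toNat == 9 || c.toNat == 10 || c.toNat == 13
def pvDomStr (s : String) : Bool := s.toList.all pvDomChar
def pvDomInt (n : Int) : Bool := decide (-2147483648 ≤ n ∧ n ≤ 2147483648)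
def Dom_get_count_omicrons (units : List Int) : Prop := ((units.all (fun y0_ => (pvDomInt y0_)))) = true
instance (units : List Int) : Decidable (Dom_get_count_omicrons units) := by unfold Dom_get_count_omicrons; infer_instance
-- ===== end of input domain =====

-- B restructures A's single interleaved find-or-increment loop into two staged passes:
-- first collect the distinct units in first-appearance order, then tally each with a
-- separate count pass (alternative decomposition, same asymptotic cost).

-- ===== PORT A =====
-- inner 'for charter in list: if charter[0] == unit: charter[1] += 1; add = True; break'
-- (entries are always 2-lists [unit, count], so Python's charter[0]/charter[1] are in
-- range; ported exactly with List.getD)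
def pvBumpA (u : Int) : List (List Int) → List (List Int) × Bool
  | [] => ([], false)
  | c :: rest =>
    if c.getD 0 0 = u then
      (([c.getD 0 0, c.getD 1 0 + 1]) :: rest, true)
    else
      let r := pvBumpA u rest
      (c :: r.1, r.2)

def get_count_omicrons (units : List Int) : List (List Int) :=
  units.foldl
    (fun acc unit =>
      let r := pvBumpA unit acc
      if r.2 then r.1 else acc ++ [[unit, 1]])
    []

-- ===== PORT B =====
-- pass 1: 'for u in units: if u not in unique: unique.append(u)'
def pvUniqueB (units : List Int) : List Int :=
  units.foldl (fun acc u => if u ∈ acc then acc else acc ++ [u]) []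

-- pass 2: '[[u, units.count(u)] for u in unique]'
def get_count_omicrons_alt (units : List Int) : List (List Int) :=
  (pvUniqueB units).map (fun u => [u, ((PySem.List.count units u : Nat) : Int)])

-- ===== PRECONDITION & SPEC =====
def Spec_get_count_omicrons (units : List Int) (out : List (List Int)) : Prop := out = get_count_omicrons_alt units
instance (units : List Int) (out : List (List Int)) : Decidable (Spec_get_count_omicrons units out) := by unfold Spec_get_count_omicrons; infer_instance

-- ===== CLAIM (what is proved, stated in full; the proofs are below) =====
def Claim_equal_get_count_omicrons : Prop := ∀ (units : List Int), Dom_get_count_omicrons units → Spec_get_count_omicrons units (get_count_omicrons units)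

-- ===== LEMMAS AND PROOFS =====

def pvUniqAux (acc : List Int) (xs : List Int) : List Int :=
  xs.foldl (fun acc u => if u ∈ acc then acc else acc ++ [u]) acc

lemma pvUniqAux_eq (units : List Int) : pvUniqueB units = pvUniqAux [] units := rfl

lemma mem_pvUniqAux (v : Int) (xs acc : List Int) :
    v ∈ pvUniqAux acc xs ↔ v ∈ acc ∨ v ∈ xs := by
  induction xs generalizing acc with
  | nil => simp [pvUniqAux]
  | cons x xs ih =>
    simp only [pvUniqAux, List.foldl_cons]
    by_cases h : x ∈ acc
    · simp only [if_pos h]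
      rw [show (xs.foldl (fun acc u => if u ∈ acc then acc else acc ++ [u]) acc) = pvUniqAux acc xs from rfl, ih]
      constructor
      · rintro (hv | hv) <;> simp_all
      · rintro (hv | hv)
        · exact Or.inl hv
        · rcases List.mem_cons.mp hv with rfl | hv
          · exact Or.inl h
          · exact Or.inr hv
    · simp only [if_neg h]
      rw [show (xs.foldl (fun acc u => if u ∈ acc then acc else acc ++ [u]) (acc ++ [x])) = pvUniqAux (acc ++ [x]) xs from rfl, ih]
      simp [or_assoc, or_comm, or_left_comm]

lemma nodup_pvUniqAux (xs acc : List Int) (hacc : acc.Nodup) :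
    (pvUniqAux acc xs).Nodup := by
  induction xs generalizing acc with
  | nil => simpa [pvUniqAux]
  | cons x xs ih =>
    simp only [pvUniqAux, List.foldl_cons]
    by_cases h : x ∈ acc
    · simpa [if_pos h] using ih acc hacc
    · simp only [if_neg h]
      refine ih (acc ++ [x]) ?_
      refine List.Nodup.append hacc (List.nodup_singleton x) ?_
      intro a ha hb
      simp only [List.mem_singleton] at hb
      subst hb
      exact h ha

lemma pvUniqAux_append_one (acc xs : List Int) (u : Int) :
    pvUniqAux acc (xs ++ [u]) =
      if u ∈ pvUniqAux acc xs then pvUniqAux acc xs else pvUniqAux acc xs ++ [u] := by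
  simp [pvUniqAux, List.foldl_append]

-- A's state after processing a prefix p, expressed through B's two passes
def pvStateOf (p : List Int) : List (List Int) :=
  (pvUniqueB p).map (fun v => [v, ((p.count v : Nat) : Int)])

lemma pvBumpA_not_mem (u : Int) (l : List Int) (f : Int → Int) (h : u ∉ l) :
    pvBumpA u (l.map (fun v => [v, f v])) = (l.map (fun v => [v, f v]), false) := by
  induction l with
  | nil => simp [pvBumpA]
  | cons x xs ih =>
    have hxu : x ≠ u := fun e => h (e ▸ List.mem_cons_self ..)
    simp only [List.map_cons, pvBumpA, List.getD]
    rw [if_neg (by simpa using hxu)]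
    have := ih (fun hm => h (List.mem_cons_of_mem _ hm))
    simp [this]

lemma pvBumpA_mem (u : Int) (l : List Int) (f : Int → Int)
    (h : u ∈ l) (hnd : l.Nodup) :
    pvBumpA u (l.map (fun v => [v, f v])) =
      (l.map (fun v => [v, if v = u then f v + 1 else f v]), true) := by
  induction l with
  | nil => simp at h
  | cons x xs ih =>
    rcases List.mem_cons.mp h with rfl | hm
    · have hx : u ∉ xs := (List.nodup_cons.mp hnd).1
      simp only [List.map_cons, pvBumpA, List.getD, List.getElem?_cons_zero,
        List.getElem?_cons_succ, Option.getD_some, if_pos, Prod.mk.injEq,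
        List.cons.injEq, and_true]
      refine ⟨trivial, ?_⟩
      apply List.map_congr_left
      intro a ha
      have : a ≠ u := fun e => hx (e ▸ ha)
      simp [this]
    · have hxu : x ≠ u := fun e => (List.nodup_cons.mp hnd).1 (e ▸ hm)
      simp only [List.map_cons, pvBumpA, List.getD]
      rw [if_neg (by simpa using hxu)]
      have := ih hm (List.nodup_cons.mp hnd).2
      simp [this, hxu]

lemma pvState_step (p : List Int) (u : Int) :
    (let r := pvBumpA u (pvStateOf p);
     if r.2 then r.1 else pvStateOf p ++ [[u, 1]]) = pvStateOf (p ++ [u]) := by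
  have hnd : (pvUniqueB p).Nodup := by
    rw [pvUniqAux_eq]; exact nodup_pvUniqAux p [] List.nodup_nil
  have hmem : u ∈ pvUniqueB p ↔ u ∈ p := by
    rw [pvUniqAux_eq, mem_pvUniqAux]; simp
  by_cases hu : u ∈ p
  · have hb := pvBumpA_mem u (pvUniqueB p) (fun v => ((p.count v : Nat) : Int))
      (hmem.mpr hu) hnd
    simp only [pvStateOf] at hb ⊢
    rw [hb]
    simp only [if_pos]
    have huniq : pvUniqueB (p ++ [u]) = pvUniqueB p := by
      rw [pvUniqAux_eq, pvUniqAux_eq, pvUniqAux_append_one,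
        if_pos (by rw [← pvUniqAux_eq]; exact hmem.mpr hu)]
    rw [huniq]
    apply List.map_congr_left
    intro a _
    by_cases hau : a = u
    · subst hau; simp [List.count_append]
    · have hua : ¬(u = a) := fun e => hau e.symm
      simp [hau, hua, List.count_append]
  · have hb := pvBumpA_not_mem u (pvUniqueB p) (fun v => ((p.count v : Nat) : Int))
      (fun hm => hu (hmem.mp hm))
    simp only [pvStateOf] at hb ⊢
    rw [hb]
    simp only [Bool.false_eq_true, ite_false]
    have huniq : pvUniqueB (p ++ [u]) = pvUniqueB p ++ [u] := by
      rw [pvUniqAux_eq, pvUniqAux_eq, pvUniqAux_append_one,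
        if_neg (by rw [← pvUniqAux_eq]; exact fun hm => hu (hmem.mp hm))]
    rw [huniq, List.map_append]
    congr 1
    · apply List.map_congr_left
      intro a ha
      have hap : a ∈ p := by
        have := (mem_pvUniqAux a p []).mp (by rwa [← pvUniqAux_eq])
        simpa using this
      have hau : a ≠ u := fun e => hu (e ▸ hap)
      have hua : ¬(u = a) := fun e => hau e.symm
      simp [List.count_append, hua]
    · simp [List.count_append, List.count_singleton, List.count_eq_zero.mpr hu]

lemma pvFoldA_state (xs p : List Int) :
    xs.foldl
      (fun acc unit =>
        let r := pvBumpA unit acc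
        if r.2 then r.1 else acc ++ [[unit, 1]])
      (pvStateOf p) = pvStateOf (p ++ xs) := by
  induction xs generalizing p with
  | nil => simp
  | cons x xs ih =>
    simp only [List.foldl_cons]
    rw [pvState_step p x, ih (p ++ [x])]
    simp

-- ===== VERDICT (by name: the statement is the Claim_ definition above) =====
theorem get_count_omicrons_spec : Claim_equal_get_count_omicrons := by
  intro units _
  unfold Spec_get_count_omicrons get_count_omicrons get_count_omicrons_alt
  have h0 : pvStateOf [] = [] := rfl
  have := pvFoldA_state units []
  rw [h0] at this
  rw [this]
  simp [pvStateOf, PySem.List.count_eq]
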